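-- pv_equiv track=rewrite | github.com/Ilin-Maksym/TCP_Port-Scanner | src/utils.py | parse_port_range
-- ===== SOURCE A (Python) =====
-- def parse_port_range(r: str) -> list:
--   ports = set();
--   parts = [p.strip() for p in r.split(",") if p.strip()];
--
--   for part in parts:
--     if "-" in part:
--       start, end = part.split("-", 1);
--       start_i = int(start);
--       end_i = int(end);
--
--       if start_i > end_i:
--         start_i, end_i = end_i, start_i;
--
--       ports.update(range(max(1, start_i), min(65535, end_i) + 1));
--     else:
--       pi = int(part);
--
--       if 1 <= pi <= 65535:
--         ports.add(pi);
--
--   return sorted(ports);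
-- ===== SOURCE B (Python) =====
-- def parse_port_range(r: str) -> list:
--     # Interval strategy: collect each token as one clamped (lo, hi) interval,
--     # sort the few intervals by start, then emit the union left to right,
--     # clipping each interval past the last port already emitted -- no set,
--     # no per-port dedup, and the output comes out sorted by construction.
--     intervals = []
--     for p in r.split(","):
--         part = p.strip()
--         if not part:
--             continue
--         if "-" in part:
--             start, end = part.split("-", 1)
--             start_i = int(start)
--             end_i = int(end)
--             if start_i > end_i:
--                 start_i, end_i = end_i, start_i
--             lo, hi = max(1, start_i), min(65535, end_i)
--             if lo <= hi:
--                 intervals.append((lo, hi))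
--         else:
--             pi = int(part)
--             if 1 <= pi <= 65535:
--                 intervals.append((pi, pi))
--     intervals.sort(key=lambda iv: iv[0])
--     out = []
--     last = 0
--     for lo, hi in intervals:
--         if lo <= last:
--             lo = last + 1
--         if lo <= hi:
--             out.extend(range(lo, hi + 1))
--             last = hi
--     return out
-- ===== Notes on version B (the rewrite author's own statement) =====
-- stated objective: alternative
-- what changed: Same tokenization and per-token int() parsing, but instead of accumulating every port in a set and comparison-sorting it at the end, B turns each token into one clamped (lo,hi) interval, sorts the few intervals by start and emits their union left-to-right with clipping, so the output is produced already sorted (no set, no per-port dedup).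
import Mathlib
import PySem

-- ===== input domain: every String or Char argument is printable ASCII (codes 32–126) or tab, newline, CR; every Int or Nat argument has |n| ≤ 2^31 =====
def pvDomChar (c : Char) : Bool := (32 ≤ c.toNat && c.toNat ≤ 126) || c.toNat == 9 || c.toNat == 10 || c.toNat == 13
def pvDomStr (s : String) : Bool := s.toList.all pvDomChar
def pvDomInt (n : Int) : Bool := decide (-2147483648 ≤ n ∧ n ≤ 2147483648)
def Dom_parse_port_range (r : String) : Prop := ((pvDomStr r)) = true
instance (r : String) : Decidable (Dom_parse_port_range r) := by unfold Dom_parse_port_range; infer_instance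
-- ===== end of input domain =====

-- B replaces A's per-port set + comparison sort with clamped (lo,hi) intervals sorted by start
-- and emitted left-to-right with clipping, so the output is produced already sorted.


-- ===== PORT A =====
-- per-token body of A's loop; each `(PySem.Int.ofChars? …).getD 0` marks a spot where
-- Python's int() would raise ValueError: those inputs are excluded by Pre_ below
def pa_step (s : PySem.Set Int) (part : List Char) : PySem.Set Int :=
  if PySem.Chars.isIn ['-'] part then
    match PySem.Chars.splitOnMax part ['-'] 1 with
    | [st, en] =>
      let start_i := (PySem.Int.ofChars? st).getD 0
      let end_i := (PySem.Int.ofChars? en).getD 0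
      let p := if start_i > end_i then (end_i, start_i) else (start_i, end_i)
      PySem.Set.update s (PySem.List.pyRange (max 1 p.1) (min 65535 p.2 + 1) 1)
    | _ => s  -- unreachable: '-' in part ⇒ part.split("-", 1) has exactly two pieces
  else
    let pi := (PySem.Int.ofChars? part).getD 0
    if 1 ≤ pi ∧ pi ≤ 65535 then PySem.Set.add s pi else s

def parse_port_range (r : String) : List Int :=
  let parts := ((PySem.Chars.splitOn r.toList [',']).map PySem.Chars.strip).filter (fun p => p ≠ [])
  let ports := parts.foldl pa_step PySem.Set.empty
  PySem.List.sorted ports (fun x => x) false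

-- ===== PORT B =====
-- per-token body of B's loop: identical tokenization and parsing, but each token becomes at
-- most one clamped (lo, hi) interval appended to a list (no set)
def pb_tok (acc : List (Int × Int)) (part : List Char) : List (Int × Int) :=
  if part = [] then acc  -- 'if not part: continue'
  else if PySem.Chars.isIn ['-'] part then
    match PySem.Chars.splitOnMax part ['-'] 1 with
    | [st, en] =>
      let start_i := (PySem.Int.ofChars? st).getD 0
      let end_i := (PySem.Int.ofChars? en).getD 0
      let p := if start_i > end_i then (end_i, start_i) else (start_i, end_i)
      let lo := max 1 p.1
      let hi := min 65535 p.2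
      if lo ≤ hi then acc ++ [(lo, hi)] else acc
    | _ => acc
  else
    let pi := (PySem.Int.ofChars? part).getD 0
    if 1 ≤ pi ∧ pi ≤ 65535 then acc ++ [(pi, pi)] else acc

-- body of B's emission loop over the sorted intervals: state = (out, last emitted port)
def pb_merge (st : List Int × Int) (iv : Int × Int) : List Int × Int :=
  let lo := if iv.1 ≤ st.2 then st.2 + 1 else iv.1
  if lo ≤ iv.2 then (st.1 ++ PySem.List.pyRange lo (iv.2 + 1) 1, iv.2) else st

def parse_port_range_alt (r : String) : List Int :=
  let intervals := (PySem.Chars.splitOn r.toList [',']).foldl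
    (fun acc p => pb_tok acc (PySem.Chars.strip p)) []
  let sortedIv := PySem.List.sorted intervals (fun iv => iv.1) false
  (sortedIv.foldl pb_merge ([], 0)).1

-- ===== PRECONDITION & SPEC =====
-- does this stripped token parse without a ValueError in A's int() calls?
def pvTokOK (part : List Char) : Bool :=
  if PySem.Chars.isIn ['-'] part then
    match PySem.Chars.splitOnMax part ['-'] 1 with
    | [st, en] => (PySem.Int.ofChars? st).isSome && (PySem.Int.ofChars? en).isSome
    | _ => false
  else (PySem.Int.ofChars? part).isSome

-- Pre_ excludes exactly the inputs on which Python A raises ValueError: some non-empty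
-- stripped token whose int() call(s) reject it.
def Pre_parse_port_range (r : String) : Prop :=
  ((((PySem.Chars.splitOn r.toList [',']).map PySem.Chars.strip).filter (fun p => p ≠ [])).all pvTokOK = true)
instance (r : String) : Decidable (Pre_parse_port_range r) := by unfold Pre_parse_port_range; infer_instance

def pvWitness_parse_port_range : String := "80, 20-25,7"

def Spec_parse_port_range (r : String) (out : List Int) : Prop := out = parse_port_range_alt r
instance (r : String) (out : List Int) : Decidable (Spec_parse_port_range r out) := by unfold Spec_parse_port_range; infer_instance

-- ===== CLAIM (what is proved, stated in full; the proofs are below) =====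
def Claim_equal_parse_port_range : Prop := ∀ (r : String), Dom_parse_port_range r → Pre_parse_port_range r → Spec_parse_port_range r (parse_port_range r)

-- ===== LEMMAS AND PROOFS =====

-- the loop invariant: A's set holds exactly the ports covered by B's interval list
def pvInv (s : PySem.Set Int) (ivs : List (Int × Int)) : Prop :=
  s.Nodup ∧ (∀ iv ∈ ivs, 1 ≤ iv.1) ∧
    ∀ x : Int, x ∈ s ↔ ∃ iv ∈ ivs, iv.1 ≤ x ∧ x ≤ iv.2

theorem pvInv_step (s : PySem.Set Int) (ivs : List (Int × Int)) (part : List Char)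
    (h : pvInv s ivs) : pvInv (pa_step s part) (pb_tok ivs part) := by
  obtain ⟨hnd, hbd, hmem⟩ := h
  by_cases hemp : part = []
  · subst hemp; simpa [pb_tok] using ⟨hnd, hbd, hmem⟩
  unfold pa_step pb_tok
  rw [if_neg hemp]
  split
  · split
    · rename_i st en heq
      dsimp only
      set p := if (PySem.Int.ofChars? st).getD 0 > (PySem.Int.ofChars? en).getD 0
        then ((PySem.Int.ofChars? en).getD 0, (PySem.Int.ofChars? st).getD 0)
        else ((PySem.Int.ofChars? st).getD 0, (PySem.Int.ofChars? en).getD 0) with hp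
      by_cases hle : max 1 p.1 ≤ min 65535 p.2
      · rw [if_pos hle]
        refine ⟨PySem.Set.nodup_update s _ hnd, ?_, ?_⟩
        · intro iv hiv
          rcases List.mem_append.mp hiv with hiv | hiv
          · exact hbd iv hiv
          · rcases List.mem_singleton.mp hiv with rfl; simp
        intro x
        rw [PySem.Set.mem_update, hmem x, PySem.List.mem_pyRange_one]
        constructor
        · rintro (⟨iv, hiv, g⟩ | g)
          · exact ⟨iv, List.mem_append_left _ hiv, g⟩
          · exact ⟨_, List.mem_append_right _ (List.mem_singleton_self _), by omega⟩
        · rintro ⟨iv, hiv, g⟩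
          rcases List.mem_append.mp hiv with hiv | hiv
          · exact Or.inl ⟨iv, hiv, g⟩
          · rcases List.mem_singleton.mp hiv with rfl
            exact Or.inr (by omega)
      · rw [if_neg hle,
          PySem.List.pyRange_one_eq_nil (show min 65535 p.2 + 1 ≤ max 1 p.1 by omega)]
        exact ⟨hnd, hbd, hmem⟩
    · exact ⟨hnd, hbd, hmem⟩
  · dsimp only
    set pi := (PySem.Int.ofChars? part).getD 0 with hpi
    split
    · rename_i hg
      refine ⟨PySem.Set.nodup_add s pi hnd, ?_, ?_⟩
      · intro iv hiv
        rcases List.mem_append.mp hiv with hiv | hiv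
        · exact hbd iv hiv
        · rcases List.mem_singleton.mp hiv with rfl; exact hg.1
      intro x
      rw [PySem.Set.mem_add, hmem x]
      constructor
      · rintro (⟨iv, hiv, g⟩ | rfl)
        · exact ⟨iv, List.mem_append_left _ hiv, g⟩
        · exact ⟨_, List.mem_append_right _ (List.mem_singleton_self _), le_refl _, le_refl _⟩
      · rintro ⟨iv, hiv, g⟩
        rcases List.mem_append.mp hiv with hiv | hiv
        · exact Or.inl ⟨iv, hiv, g⟩
        · rcases List.mem_singleton.mp hiv with rfl
          exact Or.inr (by omega)
    · exact ⟨hnd, hbd, hmem⟩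

theorem pvInv_fold (l : List (List Char)) (s : PySem.Set Int) (ivs : List (Int × Int))
    (h : pvInv s ivs) :
    pvInv (((l.map PySem.Chars.strip).filter (fun p => p ≠ [])).foldl pa_step s)
      (l.foldl (fun acc p => pb_tok acc (PySem.Chars.strip p)) ivs) := by
  induction l generalizing s ivs with
  | nil => exact h
  | cons p l ih =>
    simp only [List.map_cons, List.filter_cons, List.foldl_cons]
    by_cases hemp : PySem.Chars.strip p = []
    · rw [hemp]
      simp only [ne_eq, not_true_eq_false, decide_false]
      have : pb_tok ivs [] = ivs := by simp [pb_tok]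
      rw [this]
      exact ih s ivs h
    · simp only [ne_eq, hemp, not_false_eq_true, decide_true]
      exact ih _ _ (pvInv_step s ivs _ h)

-- B's emission loop over the lo-sorted intervals: the output stays strictly increasing and
-- collects exactly the covered ports; 'm ≤ every remaining lo' and '[m, last] ⊆ out' justify clipping
theorem pvMerge (ivs : List (Int × Int)) (out : List Int) (last m : Int)
    (hs : ivs.Pairwise (fun a b => a.1 ≤ b.1)) (hm : ∀ iv ∈ ivs, m ≤ iv.1)
    (h1 : out.Pairwise (· < ·)) (h2 : ∀ y ∈ out, y ≤ last)
    (h3 : ∀ z : Int, m ≤ z → z ≤ last → z ∈ out) :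
    (ivs.foldl pb_merge (out, last)).1.Pairwise (· < ·) ∧
    (∀ x : Int, x ∈ (ivs.foldl pb_merge (out, last)).1 ↔
      (x ∈ out ∨ ∃ iv ∈ ivs, iv.1 ≤ x ∧ x ≤ iv.2)) := by
  induction ivs generalizing out last m with
  | nil => exact ⟨h1, fun x => by simp⟩
  | cons iv rest ih =>
    have hsrest : rest.Pairwise (fun a b => a.1 ≤ b.1) := hs.tail
    have hmrest : ∀ jv ∈ rest, iv.1 ≤ jv.1 := fun jv hj => (List.pairwise_cons.mp hs).1 jv hj
    have hmiv : m ≤ iv.1 := hm iv (List.mem_cons_self)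
    set lo := if iv.1 ≤ last then last + 1 else iv.1 with hlo
    have hlo1 : iv.1 ≤ lo := by rw [hlo]; split <;> omega
    have hlolast : last < lo := by rw [hlo]; split <;> omega
    by_cases hcase : lo ≤ iv.2
    · have hpb : pb_merge (out, last) iv = (out ++ PySem.List.pyRange lo (iv.2 + 1) 1, iv.2) := by
        unfold pb_merge; rw [← hlo]; dsimp only; rw [if_pos hcase]
      rw [List.foldl_cons, hpb]
      have h1' : (out ++ PySem.List.pyRange lo (iv.2 + 1) 1).Pairwise (· < ·) := by
        rw [List.pairwise_append]
        refine ⟨h1, PySem.List.pairwise_lt_pyRange_one _ _, ?_⟩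
        intro y hy z hz
        rw [PySem.List.mem_pyRange_one] at hz
        have := h2 y hy
        omega
      have h2' : ∀ y ∈ out ++ PySem.List.pyRange lo (iv.2 + 1) 1, y ≤ iv.2 := by
        intro y hy
        rcases List.mem_append.mp hy with hy | hy
        · have := h2 y hy; omega
        · rw [PySem.List.mem_pyRange_one] at hy; omega
      have h3' : ∀ z : Int, iv.1 ≤ z → z ≤ iv.2 → z ∈ out ++ PySem.List.pyRange lo (iv.2 + 1) 1 := by
        intro z g1 g2
        by_cases hzl : z < lo
        · refine List.mem_append_left _ (h3 z (by omega) ?_)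
          rw [hlo] at hzl; split at hzl <;> omega
        · exact List.mem_append_right _ (PySem.List.mem_pyRange_one.mpr (by omega))
      obtain ⟨r1, r2⟩ := ih (out ++ PySem.List.pyRange lo (iv.2 + 1) 1) iv.2 iv.1
        hsrest hmrest h1' h2' h3'
      refine ⟨r1, ?_⟩
      intro x
      rw [r2 x, List.mem_append, PySem.List.mem_pyRange_one]
      constructor
      · rintro ((hx | hx) | ⟨jv, hj, g⟩)
        · exact Or.inl hx
        · exact Or.inr ⟨iv, List.mem_cons_self, by omega⟩
        · exact Or.inr ⟨jv, List.mem_cons_of_mem _ hj, g⟩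
      · rintro (hx | ⟨jv, hj, g⟩)
        · exact Or.inl (Or.inl hx)
        · rcases List.mem_cons.mp hj with rfl | hj
          · by_cases hzl : x < lo
            · refine Or.inl (Or.inl (h3 x (by omega) ?_))
              rw [hlo] at hzl; split at hzl <;> omega
            · exact Or.inl (Or.inr (by omega))
          · exact Or.inr ⟨jv, hj, g⟩
    · have hpb : pb_merge (out, last) iv = (out, last) := by
        unfold pb_merge; rw [← hlo]; dsimp only; rw [if_neg hcase]
      rw [List.foldl_cons, hpb]
      have h3'' : ∀ z : Int, iv.1 ≤ z → z ≤ last → z ∈ out := fun z g1 g2 => h3 z (by omega) g2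
      obtain ⟨r1, r2⟩ := ih out last iv.1 hsrest hmrest h1 h2 h3''
      refine ⟨r1, ?_⟩
      intro x
      rw [r2 x]
      constructor
      · rintro (hx | ⟨jv, hj, g⟩)
        · exact Or.inl hx
        · exact Or.inr ⟨jv, List.mem_cons_of_mem _ hj, g⟩
      · rintro (hx | ⟨jv, hj, g⟩)
        · exact Or.inl hx
        · rcases List.mem_cons.mp hj with rfl | hj
          · refine Or.inl (h3 x (by omega) ?_)
            rw [hlo] at hcase; split at hcase <;> omega
          · exact Or.inr ⟨jv, hj, g⟩

theorem pv_eq (r : String) : parse_port_range r = parse_port_range_alt r := by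
  unfold parse_port_range parse_port_range_alt
  obtain ⟨hnd, hbd, hmem⟩ := pvInv_fold (PySem.Chars.splitOn r.toList [','])
    PySem.Set.empty []
    ⟨List.nodup_nil, by simp, fun x => by
      constructor
      · intro hc; exact absurd hc (List.not_mem_nil)
      · rintro ⟨iv, hiv, -⟩; exact absurd hiv (List.not_mem_nil)⟩
  set ivs := (PySem.Chars.splitOn r.toList [',']).foldl
    (fun acc p => pb_tok acc (PySem.Chars.strip p)) [] with hivs
  obtain ⟨m1, m2⟩ := pvMerge (PySem.List.sorted ivs (fun iv => iv.1) false) [] 0 1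
    (PySem.List.sorted_pairwise ivs (fun iv => iv.1))
    (fun iv hiv => hbd iv ((PySem.List.mem_sorted ivs (fun jv => jv.1) false iv).mp hiv))
    List.Pairwise.nil (by simp) (by intro z g1 g2; omega)
  apply PySem.List.sorted_eq_of_perm_of_pairwise_lt
  · refine (List.perm_ext_iff_of_nodup (m1.imp fun h => ne_of_lt h) hnd).mpr ?_
    intro x
    rw [m2 x, hmem x]
    constructor
    · rintro (hx | ⟨iv, hiv, g⟩)
      · exact absurd hx (List.not_mem_nil)
      · exact ⟨iv, (PySem.List.mem_sorted ivs (fun jv => jv.1) false iv).mp hiv, g⟩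
    · rintro ⟨iv, hiv, g⟩
      exact Or.inr ⟨iv, (PySem.List.mem_sorted ivs (fun jv => jv.1) false iv).mpr hiv, g⟩
  · exact m1

-- ===== VERDICT (by name: the statement is the Claim_ definition above) =====
theorem parse_port_range_spec : Claim_equal_parse_port_range := by
  intro r _ _
  exact pv_eq r
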